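-- pv_equiv track=rewrite | github.com/tazomatalax/prescience | task_coauthor_prediction/train_projection.py | build_author_timeline
-- ===== SOURCE A (Python) =====
-- def build_author_timeline(sd2publications, all_papers_dict):
--     """Build sorted (date, author_id) list for binary search over author first-publish dates."""
--     author_first_date = {}
--     for author_id, pubs in sd2publications.items():
--         if pubs is None or len(pubs) == 0:
--             continue
--         dates = [all_papers_dict[p]["date"] for p in pubs if p in all_papers_dict]
--         if dates:
--             author_first_date[author_id] = min(dates)
--
--     sorted_authors = sorted(author_first_date.items(), key=lambda x: x[1])
--     sorted_dates = [d for _, d in sorted_authors]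
--     sorted_ids = [aid for aid, _ in sorted_authors]
--     return sorted_dates, sorted_ids
-- ===== SOURCE B (Python) =====
-- def build_author_timeline(sd2publications, all_papers_dict):
--     """Global sort-then-first-seen: flatten every found publication into
--     (date, author_index, author_id) triples, sort once, and keep each author's
--     first-seen entry -- same (first_date, dict-order) output as the per-author
--     min + sort of A, computed by one flat sort."""
--     flat = []
--     for idx, (author_id, pubs) in enumerate(sd2publications.items()):
--         if not pubs:
--             continue
--         for p in pubs:
--             if p in all_papers_dict:
--                 flat.append((all_papers_dict[p]["date"], idx, author_id))
--     flat.sort(key=lambda e: (e[0], e[1]))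
--     seen = set()
--     sorted_dates, sorted_ids = [], []
--     for date, idx, author_id in flat:
--         if author_id not in seen:
--             seen.add(author_id)
--             sorted_dates.append(date)
--             sorted_ids.append(author_id)
--     return sorted_dates, sorted_ids
-- ===== Notes on version B (the rewrite author's own statement) =====
-- stated objective: alternative
-- what changed: Instead of computing each author's min publication date and then stably sorting the authors, B flattens all found publications into (date, author_index, author_id) triples, sorts that flat list once by (date, index), and keeps each author's first-seen entry in a single scan.
import Mathlib
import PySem

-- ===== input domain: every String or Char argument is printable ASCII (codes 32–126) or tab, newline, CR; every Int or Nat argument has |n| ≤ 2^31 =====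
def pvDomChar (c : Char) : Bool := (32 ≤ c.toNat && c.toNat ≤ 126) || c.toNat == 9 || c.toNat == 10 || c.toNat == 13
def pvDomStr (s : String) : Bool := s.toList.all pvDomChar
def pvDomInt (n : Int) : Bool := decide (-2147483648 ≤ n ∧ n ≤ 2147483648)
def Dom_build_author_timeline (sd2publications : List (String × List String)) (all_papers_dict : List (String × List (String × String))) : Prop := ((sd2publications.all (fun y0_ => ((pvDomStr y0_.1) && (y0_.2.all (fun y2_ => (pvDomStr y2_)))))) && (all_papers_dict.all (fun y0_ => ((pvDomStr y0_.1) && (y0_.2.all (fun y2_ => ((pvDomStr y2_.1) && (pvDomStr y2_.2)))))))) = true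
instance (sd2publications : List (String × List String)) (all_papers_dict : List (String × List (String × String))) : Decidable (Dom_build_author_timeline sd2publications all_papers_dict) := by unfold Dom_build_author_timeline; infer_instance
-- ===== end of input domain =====

-- B replaces A's per-author min + stable sort of authors by one flat sort of all
-- (date, author_index, author_id) triples followed by a first-seen scan (objective: alternative).

-- ===== PORT A =====
-- dates = [all_papers_dict[p]["date"] for p in pubs if p in all_papers_dict]
-- ("date" lookup is first-match on the association list; Pre_ keeps record keys unique, so it is dict-exact)
def pvA_dates (all_papers_dict : List (String × List (String × String))) (pubs : List String) : List String :=
  (pubs.filter (fun p => (List.lookup p all_papers_dict).isSome)).map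
    (fun p => (List.lookup "date" ((List.lookup p all_papers_dict).getD [])).getD "")

-- the body of A's for-loop over sd2publications.items()
def pvA_step (all_papers_dict : List (String × List (String × String)))
    (d : PySem.Dict String String) (ap : String × List String) : PySem.Dict String String :=
  if ap.2.length = 0 then d
  else
    let dates := pvA_dates all_papers_dict ap.2
    if dates.length = 0 then d
    else d.insert ap.1 ((PySem.List.min? dates (fun x => x)).getD "")

def build_author_timeline (sd2publications : List (String × List String)) (all_papers_dict : List (String × List (String × String))) : List String × List String :=
  let author_first_date := sd2publications.foldl (pvA_step all_papers_dict) PySem.Dict.empty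
  let sorted_authors := PySem.List.sorted author_first_date.items (fun x => x.2) false
  let sorted_dates := sorted_authors.map (fun x => x.2)
  let sorted_ids := sorted_authors.map (fun x => x.1)
  (sorted_dates, sorted_ids)

-- ===== PORT B =====
-- inner loop: for p in pubs: if p in all_papers_dict: flat.append((all_papers_dict[p]["date"], idx, author_id))
def pvB_inner (all_papers_dict : List (String × List (String × String)))
    (ix : Int × String × List String) (acc : List (String × Int × String)) : List (String × Int × String) :=
  ix.2.2.foldl (fun acc p =>
    if (List.lookup p all_papers_dict).isSome then
      acc ++ [((List.lookup "date" ((List.lookup p all_papers_dict).getD [])).getD "", ix.1, ix.2.1)]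
    else acc) acc

-- body of B's enumerate loop ('if not pubs: continue')
def pvB_step (all_papers_dict : List (String × List (String × String)))
    (acc : List (String × Int × String)) (ix : Int × String × List String) : List (String × Int × String) :=
  if ix.2.2.length = 0 then acc else pvB_inner all_papers_dict ix acc

-- body of B's first-seen scan
def pvB_scan (st : PySem.Set String × List String × List String) (e : String × Int × String) :
    PySem.Set String × List String × List String :=
  if e.2.2 ∈ st.1 then st else (PySem.Set.add st.1 e.2.2, st.2.1 ++ [e.1], st.2.2 ++ [e.2.2])

def build_author_timeline_alt (sd2publications : List (String × List String)) (all_papers_dict : List (String × List (String × String))) : List String × List String :=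
  let flat := (PySem.List.enumerate sd2publications 0).foldl (pvB_step all_papers_dict) []
  let flatSorted := PySem.List.sorted2 flat (fun e => e.1) (fun e => e.2.1) false
  let fin := flatSorted.foldl pvB_scan (PySem.Set.ofList [], [], [])
  (fin.2.1, fin.2.2)

-- ===== PRECONDITION & SPEC =====
-- Pre_ excludes (i) association lists with duplicate keys (in sd2publications, in all_papers_dict, or inside a
-- paper record), which do not faithfully represent a Python dict — A's first/last-match behaviour there is a
-- representation artefact — and (ii) inputs where some referenced paper record lacks a "date" key, on which A
-- raises KeyError.
def Pre_build_author_timeline (sd2publications : List (String × List String)) (all_papers_dict : List (String × List (String × String))) : Prop :=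
  (sd2publications.map Prod.fst).Nodup ∧
  (all_papers_dict.map Prod.fst).Nodup ∧
  (∀ pr ∈ all_papers_dict, (pr.2.map Prod.fst).Nodup) ∧
  (∀ ap ∈ sd2publications, ∀ p ∈ ap.2, ∀ pr ∈ all_papers_dict, pr.1 = p → "date" ∈ pr.2.map Prod.fst)
instance (sd2publications : List (String × List String)) (all_papers_dict : List (String × List (String × String))) : Decidable (Pre_build_author_timeline sd2publications all_papers_dict) := by unfold Pre_build_author_timeline; infer_instance

def pvWitness_build_author_timeline : (List (String × List String)) × (List (String × List (String × String))) :=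
  ([("a", ["p", "q"]), ("b", ["q"])], [("p", [("date", "2020")]), ("q", [("date", "2019")])])

def Spec_build_author_timeline (sd2publications : List (String × List String)) (all_papers_dict : List (String × List (String × String))) (out : List String × List String) : Prop := out = build_author_timeline_alt sd2publications all_papers_dict
instance (sd2publications : List (String × List String)) (all_papers_dict : List (String × List (String × String))) (out : List String × List String) : Decidable (Spec_build_author_timeline sd2publications all_papers_dict out) := by unfold Spec_build_author_timeline; infer_instance

-- ===== CLAIM (what is proved, stated in full; the proofs are below) =====
def Claim_equal_build_author_timeline : Prop := ∀ (sd2publications : List (String × List String)) (all_papers_dict : List (String × List (String × String))), Dom_build_author_timeline sd2publications all_papers_dict → Pre_build_author_timeline sd2publications all_papers_dict → Spec_build_author_timeline sd2publications all_papers_dict (build_author_timeline sd2publications all_papers_dict)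

-- ===== LEMMAS AND PROOFS =====

-- abbreviations used only by the proofs
def pvKey (e : String × Int × String) : Lex (String × Int) := toLex (e.1, e.2.1)
def pvPi (e : String × Int × String) : String × String := (e.2.2, e.1)
def pvMin (ds : List String) : String := (PySem.List.min? ds (fun x => x)).getD ""
def pvF (all_papers_dict : List (String × List (String × String))) (ap : String × List String) : Option (String × String) :=
  if (pvA_dates all_papers_dict ap.2).length = 0 then none else some (ap.1, pvMin (pvA_dates all_papers_dict ap.2))
def pvQ (sd2 : List (String × List String)) (apd : List (String × List (String × String))) : List (String × Int × String) :=
  ((PySem.List.enumerate sd2 0).filter (fun ix => !(pvA_dates apd ix.2.2).length == 0)).map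
    (fun ix => (pvMin (pvA_dates apd ix.2.2), ix.1, ix.2.1))
def pvFlat (sd2 : List (String × List String)) (apd : List (String × List (String × String))) : List (String × Int × String) :=
  (PySem.List.enumerate sd2 0).flatMap (fun ix => (pvA_dates apd ix.2.2).map (fun d => (d, ix.1, ix.2.1)))
def pvKeep (seen : PySem.Set String) : List (String × Int × String) → List (String × Int × String)
  | [] => []
  | e :: t => if e.2.2 ∈ seen then pvKeep seen t else e :: pvKeep (PySem.Set.add seen e.2.2) t


theorem pvScan_eq (T : List (String × Int × String)) :
    ∀ st : PySem.Set String × List String × List String,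
      (T.foldl pvB_scan st).2.1 = st.2.1 ++ (pvKeep st.1 T).map (fun e => e.1) ∧
      (T.foldl pvB_scan st).2.2 = st.2.2 ++ (pvKeep st.1 T).map (fun e => e.2.2) := by
  induction T with
  | nil => intro st; simp [pvKeep]
  | cons e t ih =>
    intro st
    by_cases h : e.2.2 ∈ st.1
    · simpa [pvKeep, pvB_scan, h] using ih st
    · have := ih (PySem.Set.add st.1 e.2.2, st.2.1 ++ [e.1], st.2.2 ++ [e.2.2])
      simp [pvKeep, pvB_scan, h] at this ⊢
      exact this

theorem pvSorted2_eq_sorted {α κ₁ κ₂ : Type} [LinearOrder κ₁] [LinearOrder κ₂]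
    (xs : List α) (k1 : α → κ₁) (k2 : α → κ₂) :
    PySem.List.sorted2 xs k1 k2 false = PySem.List.sorted xs (fun x => toLex (k1 x, k2 x)) false := by
  rw [PySem.List.sorted_eq_foldl_insertBy]
  show List.foldl _ [] xs = _
  congr 1
  funext acc x
  congr 1
  funext a b
  rcases lt_trichotomy (k1 a) (k1 b) with h | h | h
  · simp [Prod.Lex.lt_iff, h, not_lt_of_gt h]
  · simp [Prod.Lex.lt_iff, h]
  · simp [Prod.Lex.lt_iff, h, not_lt_of_gt h, ne_of_gt h]


theorem pvA_items (apd : List (String × List (String × String))) :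
    ∀ (l : List (String × List String)) (d : PySem.Dict String String),
    (∀ ap ∈ l, d.contains ap.1 = false) → (l.map Prod.fst).Nodup →
    (l.foldl (pvA_step apd) d).items = d.items ++ l.filterMap (pvF apd) := by
  intro l
  induction l with
  | nil => intro d _ _; simp
  | cons ap t ih =>
    intro d hfresh hnd
    simp only [List.map_cons, List.nodup_cons, List.mem_map] at hnd
    have hfr : d.contains ap.1 = false := hfresh ap (by simp)
    by_cases hp : ap.2.length = 0
    · have hd0 : (pvA_dates apd ap.2).length = 0 := by
        rcases List.length_eq_zero_iff.mp hp with h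
        simp [h, pvA_dates]
      rw [List.foldl_cons]
      rw [show pvA_step apd d ap = d by simp [pvA_step, hp]]
      rw [ih d (fun b hb => hfresh b (by simp [hb])) hnd.2]
      rw [List.filterMap_cons_none (by simp [pvF, hd0])]
    · by_cases hd : (pvA_dates apd ap.2).length = 0
      · rw [List.foldl_cons, show pvA_step apd d ap = d by simp [pvA_step, hp, hd]]
        rw [ih d (fun b hb => hfresh b (by simp [hb])) hnd.2]
        rw [List.filterMap_cons_none (by simp [pvF, hd])]
      · rw [List.foldl_cons,
          show pvA_step apd d ap = d.insert ap.1 ((PySem.List.min? (pvA_dates apd ap.2) (fun x => x)).getD "") by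
            simp [pvA_step, hp, hd]]
        rw [ih _ ?_ hnd.2]
        · rw [PySem.Dict.items_insert, if_neg (by simp [hfr])]
          simp only [List.filterMap_cons, pvF, if_neg hd, pvMin]
          simp
        · intro b hb
          rw [PySem.Dict.contains_insert]
          have hne : (b.1 == ap.1) = false := by
            simp only [beq_eq_false_iff_ne, ne_eq]
            intro hEq; exact hnd.1 ⟨b, hb, hEq⟩
          simp [hne, hfresh b (by simp [hb])]

theorem pvP_eq_Q_aux (apd : List (String × List (String × String))) :
    ∀ (l : List (String × List String)) (s : Int),
    l.filterMap (pvF apd) =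
      (((PySem.List.enumerate l s).filter (fun ix => !(pvA_dates apd ix.2.2).length == 0)).map
        (fun ix => (pvMin (pvA_dates apd ix.2.2), ix.1, ix.2.1))).map pvPi := by
  intro l
  induction l with
  | nil => intro s; simp [PySem.List.enumerate]
  | cons ap t ih =>
    intro s
    rw [PySem.List.enumerate_cons]
    by_cases hd : (pvA_dates apd ap.2).length = 0
    · rw [List.filterMap_cons_none (by simp [pvF, hd])]
      rw [List.filter_cons_of_neg (by simp [hd])]
      exact ih (s + 1)
    · rw [List.filter_cons_of_pos (by simp [hd])]
      simp only [List.filterMap_cons, pvF, if_neg hd, List.map_cons, pvPi]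
      have := ih (s + 1); simp only [pvF] at this
      exact congrArg _ this

theorem pvP_eq_Q (sd2 : List (String × List String)) (apd : List (String × List (String × String))) :
    sd2.filterMap (pvF apd) = (pvQ sd2 apd).map pvPi := pvP_eq_Q_aux apd sd2 0

theorem pvFlat_eq (sd2 : List (String × List String)) (apd : List (String × List (String × String))) :
    (PySem.List.enumerate sd2 0).foldl (pvB_step apd) [] = pvFlat sd2 apd := by
  unfold pvFlat
  rw [PySem.List.foldl_congr_mem (g := fun acc ix => acc ++ (pvA_dates apd ix.2.2).map (fun d => (d, ix.1, ix.2.1)))]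
  · exact PySem.List.foldl_append_eq_flatMap _ _ _
  · intro acc ix _
    unfold pvB_step pvB_inner
    by_cases hp : ix.2.2.length = 0
    · rcases List.length_eq_zero_iff.mp hp with h
      simp [h, pvA_dates]
    · rw [if_neg hp, PySem.List.foldl_append_if]
      simp [pvA_dates]


theorem pvMapInsertBy (x : String × Int × String) :
    ∀ (l : List (String × Int × String)),
    (∀ b ∈ l, (decide (pvKey x < pvKey b)) = decide ((pvPi x).2 < (pvPi b).2)) →
    (PySem.List.insertBy (fun a b => decide (pvKey a < pvKey b)) x l).map pvPi =
      PySem.List.insertBy (fun a b => decide (a.2 < b.2)) (pvPi x) (l.map pvPi) := by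
  intro l
  induction l with
  | nil => intro _; simp [PySem.List.insertBy]
  | cons y ys ih =>
    intro h
    have hy := h y (by simp)
    show (if decide (pvKey x < pvKey y) = true then x :: y :: ys else
            y :: PySem.List.insertBy (fun a b => decide (pvKey a < pvKey b)) x ys).map pvPi =
         (if decide ((pvPi x).2 < (pvPi y).2) = true then pvPi x :: pvPi y :: ys.map pvPi else
            pvPi y :: PySem.List.insertBy (fun a b => decide (a.2 < b.2)) (pvPi x) (ys.map pvPi))
    rw [← hy]
    by_cases hb : decide (pvKey x < pvKey y) = true
    · rw [if_pos hb, if_pos hb]; simp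
    · rw [if_neg hb, if_neg hb]
      simp only [List.map_cons]
      exact congrArg _ (ih (fun b hbm => h b (by simp [hbm])))

theorem pvStableCore :
    ∀ (qs acc : List (String × Int × String)),
    ((qs.map (fun e => e.2.1)).Pairwise (· < ·)) →
    (∀ a ∈ acc, ∀ q ∈ qs, a.2.1 < q.2.1) →
    (qs.foldl (fun ac x => PySem.List.insertBy (fun a b => decide (pvKey a < pvKey b)) x ac) acc).map pvPi =
      (qs.map pvPi).foldl (fun ac x => PySem.List.insertBy (fun a b => decide (a.2 < b.2)) x ac) (acc.map pvPi) := by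
  intro qs
  induction qs with
  | nil => intro acc _ _; simp
  | cons q t ih =>
    intro acc hp hacc
    simp only [List.map_cons, List.pairwise_cons] at hp
    rw [List.foldl_cons, List.map_cons, List.foldl_cons]
    rw [← pvMapInsertBy q acc ?_]
    · apply ih _ hp.2
      intro a ha q' hq'
      rcases (PySem.List.mem_insertBy _ _ _ _).mp ha with h | h
      · subst h
        have := hp.1 q'.2.1 (List.mem_map_of_mem hq')
        exact this
      · exact hacc a h q' (by simp [hq'])
    · intro b hb
      have hlt : b.2.1 < q.2.1 := hacc b hb q (by simp)
      simp only [pvKey, pvPi]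
      rw [decide_eq_decide]
      rw [Prod.Lex.lt_iff]
      simp only [ofLex_toLex]
      constructor
      · rintro (h | ⟨_, h⟩)
        · exact h
        · exact absurd h (by omega)
      · intro h; exact Or.inl h
theorem pvStable (qs : List (String × Int × String))
    (h : (qs.map (fun e => e.2.1)).Pairwise (· < ·)) :
    PySem.List.sorted (qs.map pvPi) (fun x => x.2) false =
      (PySem.List.sorted qs pvKey false).map pvPi := by
  rw [PySem.List.sorted_eq_foldl_insertBy, PySem.List.sorted_eq_foldl_insertBy]
  exact (pvStableCore qs [] h (by simp)).symm


theorem pvKeep_sublist (seen : PySem.Set String) (T : List (String × Int × String)) :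
    (pvKeep seen T).Sublist T := by
  induction T generalizing seen with
  | nil => simp [pvKeep]
  | cons e t ih =>
    by_cases h : e.2.2 ∈ seen
    · simp only [pvKeep, if_pos h]
      exact (ih seen).trans (List.sublist_cons_self e t)
    · simp only [pvKeep, if_neg h]
      exact (ih _).cons₂ e

theorem pvKeep_mem {T : List (String × Int × String)} :
    ∀ {seen : PySem.Set String} {e : String × Int × String},
    e ∈ pvKeep seen T → e ∈ T ∧ e.2.2 ∉ seen := by
  induction T with
  | nil => intro seen e h; simp [pvKeep] at h
  | cons x t ih =>
    intro seen e h
    by_cases hx : x.2.2 ∈ seen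
    · rw [show pvKeep seen (x :: t) = pvKeep seen t from by simp [pvKeep, hx]] at h
      exact ⟨List.mem_cons_of_mem _ (ih h).1, (ih h).2⟩
    · rw [show pvKeep seen (x :: t) = x :: pvKeep (PySem.Set.add seen x.2.2) t from by
        simp [pvKeep, hx]] at h
      rcases List.mem_cons.mp h with hEq | hmem
      · exact ⟨by simp [hEq], by rw [hEq]; exact hx⟩
      · have := ih hmem
        refine ⟨List.mem_cons_of_mem _ this.1, fun hm => this.2 ?_⟩
        exact (PySem.Set.mem_add _ _ _).mpr (Or.inl hm)

theorem pvKeep_ne (seen : PySem.Set String) (T : List (String × Int × String)) :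
    (pvKeep seen T).Pairwise (fun a b => a.2.2 ≠ b.2.2) := by
  induction T generalizing seen with
  | nil => simp [pvKeep]
  | cons x t ih =>
    by_cases hx : x.2.2 ∈ seen
    · simp only [pvKeep, if_pos hx]; exact ih seen
    · simp only [pvKeep, if_neg hx]
      refine List.Pairwise.cons ?_ (ih _)
      intro b hb hEq
      have := (pvKeep_mem hb).2
      exact this ((PySem.Set.mem_add _ _ _).mpr (Or.inr hEq.symm))

theorem pvKeep_first {T : List (String × Int × String)}
    (hs : T.Pairwise (fun a b => pvKey a ≤ pvKey b)) :
    ∀ {seen : PySem.Set String} {e : String × Int × String}, e ∈ pvKeep seen T →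
    ∀ e' ∈ T, e'.2.2 = e.2.2 → pvKey e ≤ pvKey e' ∨ e = e' := by
  induction T with
  | nil => intro seen e h; simp [pvKeep] at h
  | cons x t ih =>
    intro seen e he e' he' haid
    rw [List.pairwise_cons] at hs
    by_cases hx : x.2.2 ∈ seen
    · simp only [pvKeep, if_pos hx] at he
      rcases List.mem_cons.mp he' with h | h
      · exfalso
        have := (pvKeep_mem he).2
        rw [← haid, h] at this
        exact this hx
      · exact ih hs.2 he e' h haid
    · simp only [pvKeep, if_neg hx] at he
      rcases List.mem_cons.mp he with h | h
      · subst h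
        rcases List.mem_cons.mp he' with h' | h'
        · exact Or.inr h'.symm
        · exact Or.inl (hs.1 e' h')
      · rcases List.mem_cons.mp he' with h' | h'
        · exfalso
          have := (pvKeep_mem h).2
          rw [← haid, h'] at this
          exact this ((PySem.Set.mem_add _ _ _).mpr (Or.inr rfl))
        · exact ih hs.2 h e' h' haid

theorem pvKeep_complete {T : List (String × Int × String)} :
    ∀ {seen : PySem.Set String} {e' : String × Int × String}, e' ∈ T → e'.2.2 ∉ seen →
    ∃ e ∈ pvKeep seen T, e.2.2 = e'.2.2 := by
  induction T with
  | nil => intro seen e' h; simp at h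
  | cons x t ih =>
    intro seen e' he' hns
    by_cases hx : x.2.2 ∈ seen
    · simp only [pvKeep, if_pos hx]
      rcases List.mem_cons.mp he' with h | h
      · exact absurd (h ▸ hns) (by simp [hx])
      · exact ih h hns
    · simp only [pvKeep, if_neg hx]
      by_cases haid : e'.2.2 = x.2.2
      · exact ⟨x, by simp, haid.symm⟩
      · rcases List.mem_cons.mp he' with h | h
        · exact absurd (congrArg (fun z => z.2.2) h) haid
        · have hns' : e'.2.2 ∉ PySem.Set.add seen x.2.2 := by
            intro hm
            rcases (PySem.Set.mem_add _ _ _).mp hm with h' | h'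
            · exact hns h'
            · exact haid h'
          rcases ih h hns' with ⟨e, he, hEq⟩
          exact ⟨e, by simp [he], hEq⟩

theorem pvMem_flat {sd2 : List (String × List String)} {apd : List (String × List (String × String))}
    {e : String × Int × String} :
    e ∈ pvFlat sd2 apd ↔ ∃ (k : Nat) (hk : k < sd2.length),
      e.2.1 = (k : Int) ∧ e.2.2 = (sd2[k]).1 ∧ e.1 ∈ pvA_dates apd (sd2[k]).2 := by
  unfold pvFlat
  rw [List.mem_flatMap]
  constructor
  · rintro ⟨ix, hix, hmem⟩
    rcases (PySem.List.mem_enumerate_iff _ _ _).mp hix with ⟨k, hk, rfl⟩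
    rcases List.mem_map.mp hmem with ⟨d, hd, rfl⟩
    exact ⟨k, hk, by simp, rfl, by simpa using hd⟩
  · rintro ⟨k, hk, h1, h2, h3⟩
    refine ⟨((k : Int), sd2[k]), (PySem.List.mem_enumerate_iff _ _ _).mpr ⟨k, hk, by simp⟩, ?_⟩
    rw [List.mem_map]
    exact ⟨e.1, h3, by rw [show e = (e.1, e.2.1, e.2.2) from rfl, h1, h2]⟩

theorem pvMem_Q {sd2 : List (String × List String)} {apd : List (String × List (String × String))}
    {q : String × Int × String} :
    q ∈ pvQ sd2 apd ↔ ∃ (k : Nat) (hk : k < sd2.length),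
      q = (pvMin (pvA_dates apd (sd2[k]).2), (k : Int), (sd2[k]).1) ∧
      pvA_dates apd (sd2[k]).2 ≠ [] := by
  unfold pvQ
  rw [List.mem_map]
  constructor
  · rintro ⟨ix, hix, rfl⟩
    rw [List.mem_filter] at hix
    rcases (PySem.List.mem_enumerate_iff _ _ _).mp hix.1 with ⟨k, hk, rfl⟩
    refine ⟨k, hk, by simp, ?_⟩
    have := hix.2
    simpa [List.length_eq_zero_iff] using this
  · rintro ⟨k, hk, rfl, hne⟩
    refine ⟨((k : Int), sd2[k]), ?_, by simp⟩
    rw [List.mem_filter]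
    exact ⟨(PySem.List.mem_enumerate_iff _ _ _).mpr ⟨k, hk, by simp⟩,
      by simpa [List.length_eq_zero_iff] using hne⟩

theorem pvIdx_inj {sd2 : List (String × List String)} (h1 : (sd2.map Prod.fst).Nodup)
    {j k : Nat} (hj : j < sd2.length) (hk : k < sd2.length)
    (hEq : (sd2[j]).1 = (sd2[k]).1) : j = k := by
  have hmap : (sd2.map Prod.fst)[j]'(by simpa using hj) = (sd2.map Prod.fst)[k]'(by simpa using hk) := by
    simpa using hEq
  exact (List.Nodup.getElem_inj_iff h1).mp hmap

theorem pvMin_spec {ds : List String} (h : ds ≠ []) :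
    pvMin ds ∈ ds ∧ ∀ d ∈ ds, pvMin ds ≤ d := by
  cases hmo : PySem.List.min? ds (fun x => x) with
  | none => exact absurd ((PySem.List.min?_eq_none_iff _ _).mp hmo) h
  | some m =>
    rw [pvMin, hmo]
    exact ⟨PySem.List.min?_mem hmo, fun d hd => PySem.List.min?_isMin hmo d hd⟩

theorem pvQ_idx (sd2 : List (String × List String)) (apd : List (String × List (String × String))) :
    ((pvQ sd2 apd).map (fun e => e.2.1)).Pairwise (· < ·) := by
  unfold pvQ
  rw [List.map_map, List.pairwise_map]
  simp only [Function.comp]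
  exact List.Pairwise.sublist List.filter_sublist (PySem.List.pairwise_lt_enumerate _ _)

theorem pvKeep_eq_sortedQ (sd2 : List (String × List String)) (apd : List (String × List (String × String)))
    (h1 : (sd2.map Prod.fst).Nodup) :
    pvKeep (PySem.Set.ofList []) (PySem.List.sorted (pvFlat sd2 apd) pvKey false) =
      PySem.List.sorted (pvQ sd2 apd) pvKey false := by
  have hTsorted : (PySem.List.sorted (pvFlat sd2 apd) pvKey false).Pairwise
      (fun a b => pvKey a ≤ pvKey b) := PySem.List.sorted_pairwise _ _
  have hTmem : ∀ e : String × Int × String,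
      e ∈ PySem.List.sorted (pvFlat sd2 apd) pvKey false ↔ e ∈ pvFlat sd2 apd :=
    fun e => PySem.List.mem_sorted _ _ _ _
  -- every kept element is a minimal triple, i.e. lies in pvQ
  have hKQ : ∀ e ∈ pvKeep (PySem.Set.ofList []) (PySem.List.sorted (pvFlat sd2 apd) pvKey false),
      e ∈ pvQ sd2 apd := by
    intro e heK
    have heT := (pvKeep_mem heK).1
    obtain ⟨d, i, aid⟩ := e
    rcases pvMem_flat.mp ((hTmem _).mp heT) with ⟨k, hk, hidx, haid, hdm⟩
    simp only at hidx haid hdm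
    subst hidx; subst haid
    have hne : pvA_dates apd (sd2[k]).2 ≠ [] := List.ne_nil_of_mem hdm
    obtain ⟨hmin_mem, hmin_le⟩ := pvMin_spec hne
    have hq0T : (pvMin (pvA_dates apd (sd2[k]).2), (k : Int), (sd2[k]).1) ∈
        PySem.List.sorted (pvFlat sd2 apd) pvKey false :=
      (hTmem _).mpr (pvMem_flat.mpr ⟨k, hk, rfl, rfl, hmin_mem⟩)
    have hdq : d = pvMin (pvA_dates apd (sd2[k]).2) := by
      rcases pvKeep_first hTsorted heK _ hq0T rfl with hle | hEq
      · refine le_antisymm ?_ (hmin_le d hdm)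
        rw [pvKey, pvKey, Prod.Lex.le_iff] at hle
        simp only [ofLex_toLex] at hle
        rcases hle with hlt | ⟨hEq, _⟩
        · exact le_of_lt hlt
        · exact le_of_eq hEq
      · exact (congrArg (fun z => z.1) hEq)
    rw [hdq]
    exact pvMem_Q.mpr ⟨k, hk, rfl, hne⟩
  have hQK : ∀ q ∈ pvQ sd2 apd,
      q ∈ pvKeep (PySem.Set.ofList []) (PySem.List.sorted (pvFlat sd2 apd) pvKey false) := by
    intro q hq
    rcases pvMem_Q.mp hq with ⟨k, hk, rfl, hne⟩
    obtain ⟨hmin_mem, _⟩ := pvMin_spec hne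
    have hqT : (pvMin (pvA_dates apd (sd2[k]).2), (k : Int), (sd2[k]).1) ∈
        PySem.List.sorted (pvFlat sd2 apd) pvKey false :=
      (hTmem _).mpr (pvMem_flat.mpr ⟨k, hk, rfl, rfl, hmin_mem⟩)
    rcases @pvKeep_complete _ (PySem.Set.ofList []) _ hqT (by simp) with ⟨e, heK, haidEq⟩
    rcases pvMem_Q.mp (hKQ e heK) with ⟨k', hk', hEq', hne'⟩
    have haid' : (sd2[k']).1 = (sd2[k]).1 := by
      have := congrArg (fun z => z.2.2) hEq'
      simp only at this
      rw [← this]; exact haidEq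
    have hkk : k' = k := pvIdx_inj h1 hk' hk haid'
    subst hkk
    rw [← hEq']
    exact heK
  -- the kept list is a strictly key-increasing permutation of pvQ
  have hnodupK : (pvKeep (PySem.Set.ofList []) (PySem.List.sorted (pvFlat sd2 apd) pvKey false)).Nodup :=
    List.Pairwise.imp (fun h hEq => h (congrArg (fun z => z.2.2) hEq)) (pvKeep_ne _ _)
  have hnodupQ : (pvQ sd2 apd).Nodup := by
    have hmapnd : ((pvQ sd2 apd).map (fun e => e.2.1)).Nodup :=
      (pvQ_idx sd2 apd).imp (fun h => ne_of_lt h)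
    exact List.Nodup.of_map _ hmapnd
  have hperm : (pvKeep (PySem.Set.ofList []) (PySem.List.sorted (pvFlat sd2 apd) pvKey false)).Perm
      (pvQ sd2 apd) :=
    (List.perm_ext_iff_of_nodup hnodupK hnodupQ).mpr (fun a => ⟨hKQ a, hQK a⟩)
  have hpl : (pvKeep (PySem.Set.ofList []) (PySem.List.sorted (pvFlat sd2 apd) pvKey false)).Pairwise
      (fun a b => pvKey a < pvKey b) := by
    have hle := List.Pairwise.sublist (pvKeep_sublist (PySem.Set.ofList []) (PySem.List.sorted (pvFlat sd2 apd) pvKey false)) hTsorted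
    have hne := pvKeep_ne (PySem.Set.ofList []) (PySem.List.sorted (pvFlat sd2 apd) pvKey false)
    refine (hle.and hne).imp_of_mem ?_
    intro a b ha hb hab
    have haT := (pvKeep_mem ha).1
    have hbT := (pvKeep_mem hb).1
    rcases pvMem_flat.mp ((hTmem a).mp haT) with ⟨ka, hka, haidx, haaid, _⟩
    rcases pvMem_flat.mp ((hTmem b).mp hbT) with ⟨kb, hkb, hbidx, hbaid, _⟩
    refine lt_of_le_of_ne hab.1 ?_
    intro hkey
    have h2 : a.2.1 = b.2.1 := by
      have := congrArg (fun z => (ofLex z).2) hkey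
      simpa [pvKey] using this
    have hkk : ka = kb := by
      rw [haidx, hbidx] at h2
      exact_mod_cast h2
    subst hkk
    exact hab.2 (by rw [haaid, hbaid])
  exact (PySem.List.sorted_eq_of_perm_of_pairwise_lt _ _ _ hperm hpl).symm


-- ===== VERDICT (by name: the statement is the Claim_ definition above) =====
theorem build_author_timeline_spec : Claim_equal_build_author_timeline := by
  intro sd2 apd _ hpre
  obtain ⟨h1, _, _, _⟩ := hpre
  simp only [Spec_build_author_timeline, build_author_timeline, build_author_timeline_alt]
  rw [pvA_items apd sd2 PySem.Dict.empty (fun ap _ => by simp) h1]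
  rw [show (PySem.Dict.empty : PySem.Dict String String).items = [] from rfl, List.nil_append]
  rw [pvP_eq_Q sd2 apd, pvStable (pvQ sd2 apd) (pvQ_idx sd2 apd)]
  rw [pvFlat_eq sd2 apd, pvSorted2_eq_sorted (pvFlat sd2 apd) (fun e => e.1) (fun e => e.2.1)]
  rw [show (fun (x : String × Int × String) => toLex (x.1, x.2.1)) = pvKey from rfl]
  have hsc := pvScan_eq (PySem.List.sorted (pvFlat sd2 apd) pvKey false) (PySem.Set.ofList [], [], [])
  rw [hsc.1, hsc.2, pvKeep_eq_sortedQ sd2 apd h1]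
  simp [List.map_map, pvPi, Function.comp]
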